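-- pv_equiv track=rewrite | github.com/aarab-abdulrahman/python | Exercices/analyse text (2).py | analyse_text
-- ===== SOURCE A (Python) =====
-- def analyse_text(x):
--     text_split=x.split()
--
--     # nombre des mots
--     nbr_mots=len(text_split)
--
--     #nombre des caracters (sans espace)
--     sum_caracters=sum(len(word) for word in text_split)
--
--     #nombre des caracters delimitees par '!' et '.' et '?'
--     nbr_caracters_delimitees=x.count('!')+x.count('.')+x.count('?')
--
--     return {
--         'nombre des mots : ':nbr_mots,
--         'somme des caracters :':sum_caracters,
--         'nombre des caracters delimitees par (! et . et ?) : ':nbr_caracters_delimitees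
--     }
-- ===== SOURCE B (Python) =====
-- def analyse_text(x):
--     nbr_mots = 0
--     sum_caracters = 0
--     nbr_caracters_delimitees = 0
--     in_word = False
--     for c in x:
--         if c.isspace():
--             in_word = False
--         else:
--             sum_caracters += 1
--             if not in_word:
--                 nbr_mots += 1
--                 in_word = True
--         if c in '!.?':
--             nbr_caracters_delimitees += 1
--     return {
--         'nombre des mots : ': nbr_mots,
--         'somme des caracters :': sum_caracters,
--         'nombre des caracters delimitees par (! et . et ?) : ': nbr_caracters_delimitees
--     }
-- ===== Notes on version B (the rewrite author's own statement) =====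
-- stated objective: alternative
-- what changed: A makes three separate passes (str.split() then a per-word length sum, plus three substring counts); B is a single loop over the characters maintaining an in_word flag and three counters.
import Mathlib
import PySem

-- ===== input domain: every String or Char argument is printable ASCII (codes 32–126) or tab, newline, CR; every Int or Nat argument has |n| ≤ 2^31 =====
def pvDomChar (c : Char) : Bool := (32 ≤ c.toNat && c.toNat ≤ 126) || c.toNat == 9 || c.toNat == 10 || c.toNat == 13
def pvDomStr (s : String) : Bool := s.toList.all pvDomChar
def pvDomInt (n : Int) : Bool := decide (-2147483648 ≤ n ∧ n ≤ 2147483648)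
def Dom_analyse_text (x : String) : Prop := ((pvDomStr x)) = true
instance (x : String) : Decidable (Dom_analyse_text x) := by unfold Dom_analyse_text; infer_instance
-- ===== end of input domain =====

-- B replaces A's three separate passes (split + per-word length sum + three substring counts)
-- by one single-pass loop with an in_word flag and three counters (objective: alternative decomposition).

-- ===== PORT A =====
def analyse_text (x : String) : List (String × Int) :=
  let text_split := PySem.Str.split₀ x
  let nbr_mots : Int := (text_split.length : Int)
  let sum_caracters : Int := (text_split.map (fun word => PySem.Str.len word)).sum
  let nbr_caracters_delimitees : Int :=
    (PySem.Str.count x "!" : Int) + (PySem.Str.count x "." : Int) + (PySem.Str.count x "?" : Int)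
  [("nombre des mots : ", nbr_mots),
   ("somme des caracters :", sum_caracters),
   ("nombre des caracters delimitees par (! et . et ?) : ", nbr_caracters_delimitees)]

-- ===== PORT B =====
-- state: (in_word, nbr_mots, sum_caracters, nbr_caracters_delimitees)
def analyseStep (st : Bool × Int × Int × Int) (c : Char) : Bool × Int × Int × Int :=
  let inWord := st.1
  let mots := st.2.1
  let chars := st.2.2.1
  let delim := st.2.2.2
  let (inWord, mots, chars) :=
    if PySem.Chars.isspace c then (false, mots, chars)
    else (true, if inWord then mots else mots + 1, chars + 1)
  let delim := if PySem.Chars.isIn [c] "!.?".toList then delim + 1 else delim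
  (inWord, mots, chars, delim)

def analyse_text_alt (x : String) : List (String × Int) :=
  let st := x.toList.foldl analyseStep (false, 0, 0, 0)
  [("nombre des mots : ", st.2.1),
   ("somme des caracters :", st.2.2.1),
   ("nombre des caracters delimitees par (! et . et ?) : ", st.2.2.2)]

-- ===== PRECONDITION & SPEC =====
def Spec_analyse_text (x : String) (out : List (String × Int)) : Prop := out = analyse_text_alt x
instance (x : String) (out : List (String × Int)) : Decidable (Spec_analyse_text x out) := by unfold Spec_analyse_text; infer_instance

-- ===== CLAIM (what is proved, stated in full; the proofs are below) =====
def Claim_equal_analyse_text : Prop := ∀ (x : String), Dom_analyse_text x → Spec_analyse_text x (analyse_text x)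

-- ===== LEMMAS AND PROOFS =====

-- `c in '!.?'` for a single-char string is list membership
lemma isIn_single (c : Char) (l : List Char) : PySem.Chars.isIn [c] l = l.contains c := by
  by_cases h : c ∈ l
  · rw [show l.contains c = true by simpa]
    rw [PySem.Chars.isIn_iff_infix]
    obtain ⟨a, b, rfl⟩ := List.mem_iff_append.mp h
    exact ⟨a, b, by simp⟩
  · rw [show l.contains c = false by simpa]
    exact (PySem.Chars.isIn_eq_false_iff _ _).mpr (fun hc => h (hc.sublist.subset (by simp)))

lemma punct_eq (c : Char) :
    PySem.Chars.isIn [c] "!.?".toList = (c == '!' || (c == '.' || c == '?')) := by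
  rw [isIn_single, show "!.?".toList = ['!', '.', '?'] from rfl]
  by_cases h1 : c = '!' <;> by_cases h2 : c = '.' <;> by_cases h3 : c = '?' <;> simp [h1, h2, h3]

lemma space_not_punct (c : Char) (h : PySem.Chars.isspace c = true) :
    PySem.Chars.isIn [c] "!.?".toList = false := by
  rw [punct_eq]
  rcases eq_or_ne c '!' with rfl | h1
  · exact absurd h (by decide)
  rcases eq_or_ne c '.' with rfl | h2
  · exact absurd h (by decide)
  rcases eq_or_ne c '?' with rfl | h3
  · exact absurd h (by decide)
  simp [h1, h2, h3]

lemma count_go_single (c : Char) :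
    ∀ (l : List Char) (fuel acc : Nat), l.length ≤ fuel →
      PySem.Chars.count.go [c] fuel l acc = acc + l.count c := by
  intro l
  induction l with
  | nil => intro fuel acc _; cases fuel <;> simp [PySem.Chars.count.go]
  | cons h t ih =>
      intro fuel acc hf
      cases fuel with
      | zero => simp at hf
      | succ f =>
          have hf' : t.length ≤ f := by simp at hf; omega
          rw [PySem.Chars.count.go]
          by_cases hc : c = h
          · subst hc
            simp only [List.isPrefixOf, BEq.rfl, Bool.true_and, if_true,
              List.length_cons, List.length_nil, List.drop_succ_cons, List.drop_zero]
            rw [ih _ _ hf']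
            simp
            omega
          · have hpre : ([c].isPrefixOf (h :: t)) = false := by
              simp [List.isPrefixOf]
              exact fun hh => hc hh
            rw [hpre]
            simp only [Bool.false_eq_true, if_false]
            rw [ih _ _ hf']
            simp [List.count_cons]
            exact fun hh => hc hh.symm
  
lemma count_single (s : List Char) (c : Char) :
    PySem.Chars.count s [c] = s.count c := by
  rw [PySem.Chars.count]
  simp only [List.isEmpty_cons, Bool.false_eq_true, if_false]
  exact (count_go_single c s s.length 0 (Nat.le_refl _)).trans (by simp)

lemma countP_punct (l : List Char) :
    l.countP (fun c => PySem.Chars.isIn [c] "!.?".toList)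
      = l.count '!' + l.count '.' + l.count '?' := by
  induction l with
  | nil => simp
  | cons h t ih =>
      rw [List.countP_cons, ih]
      simp only [List.count_cons, punct_eq]
      by_cases h1 : h = '!' <;> by_cases h2 : h = '.' <;> by_cases h3 : h = '?' <;>
        simp [h1, h2, h3] <;> omega

-- the single-pass fold computes exactly what split₀.go produces, plus the punctuation count
lemma go_fold (s : List Char) :
    ∀ (cur : List Char) (acc : List (List Char)) (d m ch : Int),
      m = (acc.length : Int) + (if cur.isEmpty then 0 else 1) →
      ch = (((acc.map List.length).sum : Nat) : Int) + (cur.length : Int) →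
      ∃ b : Bool,
        s.foldl analyseStep (!cur.isEmpty, m, ch, d)
        = (b,
           ((PySem.Chars.split₀.go s cur acc).length : Int),
           ((((PySem.Chars.split₀.go s cur acc).map List.length).sum : Nat) : Int),
           d + (s.countP (fun c => PySem.Chars.isIn [c] "!.?".toList) : Int)) := by
  induction s with
  | nil =>
      intro cur acc d m ch hm hch
      refine ⟨!cur.isEmpty, ?_⟩
      rw [PySem.Chars.split₀.go]
      subst hm hch
      cases cur with
      | nil => simp
      | cons hc tc =>
          simp
  | cons c t ih =>
      intro cur acc d m ch hm hch
      rw [List.foldl_cons, PySem.Chars.split₀.go]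
      by_cases hsp : PySem.Chars.isspace c = true
      · have hnp := space_not_punct c hsp
        have hnp' : PySem.Chars.isIn [c] ['!', '.', '?'] = false := hnp
        have hstep : analyseStep (!cur.isEmpty, m, ch, d) c = (false, m, ch, d) := by
          simp [analyseStep, hsp, hnp']
        rw [hstep, if_pos hsp, List.countP_cons]
        simp only [hnp, Bool.false_eq_true, if_false, Nat.add_zero]
        cases cur with
        | nil =>
            obtain ⟨b, hb⟩ := ih [] acc d m ch (by simpa using hm) (by simpa using hch)
            refine ⟨b, ?_⟩
            simp only [List.isEmpty_nil, Bool.not_true] at hb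
            exact hb
        | cons hc tc =>
            obtain ⟨b, hb⟩ := ih [] ((hc :: tc).reverse :: acc) d m ch
              (by simp at hm ⊢; omega)
              (by simp at hch ⊢; omega)
            refine ⟨b, ?_⟩
            simp only [List.isEmpty_nil, Bool.not_true] at hb
            exact hb
      · have hstep : analyseStep (!cur.isEmpty, m, ch, d) c
            = (true, if !cur.isEmpty then m else m + 1, ch + 1,
               if PySem.Chars.isIn [c] "!.?".toList then d + 1 else d) := by
          simp [analyseStep, hsp]
        rw [hstep, if_neg hsp]
        obtain ⟨b, hb⟩ := ih (c :: cur) acc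
          (if PySem.Chars.isIn [c] "!.?".toList then d + 1 else d)
          (if !cur.isEmpty then m else m + 1) (ch + 1)
          (by cases cur <;> simp at hm ⊢ <;> omega)
          (by simp at hch ⊢; omega)
        refine ⟨b, ?_⟩
        simp only [List.isEmpty_cons, Bool.not_false] at hb
        rw [hb, List.countP_cons]
        simp only [Prod.mk.injEq, true_and]
        push_cast
        split_ifs <;> ring

-- ===== VERDICT (by name: the statement is the Claim_ definition above) =====
theorem analyse_text_spec : Claim_equal_analyse_text := by
  intro x _
  unfold Spec_analyse_text analyse_text analyse_text_alt
  obtain ⟨b, hb⟩ := go_fold x.toList [] [] 0 0 0 (by simp) (by simp)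
  simp only [List.isEmpty_nil, Bool.not_true] at hb
  rw [hb]
  simp only [PySem.Str.split₀, PySem.Chars.split₀, List.length_map, List.map_map]
  have hsum : (List.map (PySem.Str.len ∘ String.ofList) (PySem.Chars.split₀.go x.toList [] [])).sum
      = ((((PySem.Chars.split₀.go x.toList [] []).map List.length).sum : Nat) : Int) := by
    rw [Nat.cast_list_sum, List.map_map]
    exact congrArg List.sum (List.map_congr_left (fun cs _ => by
      simp [Function.comp, PySem.Str.len_eq]))
  have hcnt : ∀ ch : Char, ∀ s : String, s.toList = [ch] →
      PySem.Str.count x s = x.toList.count ch := by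
    intro ch s hs
    rw [PySem.Str.count, hs, count_single]
  rw [hsum, countP_punct,
    hcnt '!' "!" rfl, hcnt '.' "." rfl, hcnt '?' "?" rfl]
  push_cast
  ring_nf
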